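-- pv_equiv track=rewrite | github.com/SonyAssignment8/pySelenium | sony_assignment/longLen_listcomp.py | length_str
-- ===== SOURCE A (Python) =====
-- def length_str(lists):
--     a = 0
--     answer = ""
--
--
--     for item in lists:
--         x = len(item)
--         if x > a:
--             a = x
--             answer = item
--         elif x == a:
--             if item not in answer:
--                 answer = answer + " " + item
--     return answer
-- ===== SOURCE B (Python) =====
-- def length_str(lists):
--     if not lists:
--         return ""
--     m = max(len(item) for item in lists)
--     answer = ""
--     started = False
--     for item in lists:
--         if len(item) != m:
--             continue
--         if not started:
--             answer = item
--             started = True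
--         elif item not in answer:
--             answer = answer + " " + item
--     return answer
-- ===== Notes on version B (the rewrite author's own statement) =====
-- stated objective: alternative
-- what changed: Replaces A's single pass with a running-max/reset state machine by a two-pass decomposition: first compute the maximum length, then build the answer in one filtered pass over items of exactly that length with the same substring-containment dedup.
import Mathlib
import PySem

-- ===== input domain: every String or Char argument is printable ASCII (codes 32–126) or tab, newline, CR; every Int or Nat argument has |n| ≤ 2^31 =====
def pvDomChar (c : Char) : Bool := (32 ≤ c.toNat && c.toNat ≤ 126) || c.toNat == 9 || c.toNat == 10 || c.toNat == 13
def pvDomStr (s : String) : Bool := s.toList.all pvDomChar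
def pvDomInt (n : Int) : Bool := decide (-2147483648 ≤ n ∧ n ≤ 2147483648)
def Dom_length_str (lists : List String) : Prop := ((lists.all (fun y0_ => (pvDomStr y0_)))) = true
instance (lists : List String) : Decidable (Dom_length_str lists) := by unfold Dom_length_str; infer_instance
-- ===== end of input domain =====

-- B changes the decomposition: a max-length pass first, then one filtered dedup pass (objective: alternative).

-- ===== PORT A =====
-- A's loop state is (a, answer); branches in Python order.
def length_str_stepA (st : Int × String) (item : String) : Int × String :=
  if st.1 < PySem.Str.len item then (PySem.Str.len item, item)
  else if PySem.Str.len item = st.1 then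
    (if PySem.Str.isIn item st.2 then st else (st.1, st.2 ++ " " ++ item))
  else st

def length_str (lists : List String) : String :=
  (lists.foldl length_str_stepA (0, "")).2

-- ===== PORT B =====
-- B's loop state is (answer, started); m is the precomputed maximum length.
def length_str_stepB (m : Int) (st : String × Bool) (item : String) : String × Bool :=
  if PySem.Str.len item ≠ m then st
  else if st.2 = false then (item, true)
  else if PySem.Str.isIn item st.1 then st
  else (st.1 ++ " " ++ item, true)

def length_str_alt (lists : List String) : String :=
  if lists = [] then ""
  else
    match PySem.List.max? (lists.map PySem.Str.len) (fun y => y) with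
    | none => ""  -- unreachable: lists ≠ []
    | some m => (lists.foldl (length_str_stepB m) ("", false)).1

-- ===== PRECONDITION & SPEC =====
def Spec_length_str (lists : List String) (out : String) : Prop := out = length_str_alt lists
instance (lists : List String) (out : String) : Decidable (Spec_length_str lists out) := by unfold Spec_length_str; infer_instance

-- ===== CLAIM (what is proved, stated in full; the proofs are below) =====
def Claim_equal_length_str : Prop := ∀ (lists : List String), Dom_length_str lists → Spec_length_str lists (length_str lists)

-- ===== LEMMAS AND PROOFS =====

theorem len_zero_iff (s : String) : PySem.Str.len s = 0 ↔ s = "" := by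
  rw [PySem.Str.len_eq]
  constructor
  · intro h
    have hl : s.toList = [] := by
      cases hl : s.toList with
      | nil => rfl
      | cons a t => exfalso; rw [hl] at h; simp only [List.length_cons] at h; omega
    have := congrArg String.ofList hl
    simpa using this
  · intro h; subst h; decide

theorem len_nonneg (s : String) : 0 ≤ PySem.Str.len s := by
  rw [PySem.Str.len_eq]; positivity

-- zero-max case: all items empty, A's fold stays (0, "")
theorem foldA_all_empty (l : List String) (h : ∀ e ∈ l, e = "") :
    l.foldl length_str_stepA (0, "") = (0, "") := by
  induction l with
  | nil => rfl
  | cons a t ih =>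
    have ha : a = "" := h a (by simp)
    subst ha
    have hstep : length_str_stepA (0, "") "" = (0, "") := by decide
    simp only [List.foldl_cons, hstep]
    exact ih (fun e he => h e (by simp [he]))

-- zero-max case: all items empty, B's fold answer stays ""
theorem foldB_all_empty (l : List String) (b : Bool) (h : ∀ e ∈ l, e = "") :
    (l.foldl (length_str_stepB 0) ("", b)).1 = "" := by
  induction l generalizing b with
  | nil => rfl
  | cons a t ih =>
    have ha : a = "" := h a (by simp)
    subst ha
    have hstep : length_str_stepB 0 ("", b) "" = ("", true) := by
      cases b <;> decide
    simp only [List.foldl_cons, hstep]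
    exact ih true (fun e he => h e (by simp [he]))

-- suffix lemma: once A's running max equals m and both answers agree, they stay equal
theorem fold_suffix (m : Int) (l : List String) (ans : String)
    (hle : ∀ e ∈ l, PySem.Str.len e ≤ m) :
    (l.foldl length_str_stepA (m, ans)).2 = (l.foldl (length_str_stepB m) (ans, true)).1 := by
  induction l generalizing ans with
  | nil => rfl
  | cons a t ih =>
    have hla : ((a.toList.length : Int)) ≤ m := by
      have := hle a (by simp); rwa [PySem.Str.len_eq] at this
    have hle' : ∀ e ∈ t, PySem.Str.len e ≤ m := fun e he => hle e (by simp [he])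
    by_cases hm : ((a.toList.length : Int)) = m
    · by_cases hin : PySem.Chars.isIn a.toList ans.toList = true
      · have hA : length_str_stepA (m, ans) a = (m, ans) := by
          simp only [length_str_stepA, PySem.Str.len_eq, PySem.Str.isIn_eq]
          rw [if_neg (by omega), if_pos hm, if_pos hin]
        have hB : length_str_stepB m (ans, true) a = (ans, true) := by
          simp only [length_str_stepB, PySem.Str.len_eq, PySem.Str.isIn_eq]
          rw [if_neg (not_not_intro hm), if_neg (by simp), if_pos hin]
        simp only [List.foldl_cons, hA, hB]
        exact ih ans hle'
      · have hA : length_str_stepA (m, ans) a = (m, ans ++ " " ++ a) := by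
          simp only [length_str_stepA, PySem.Str.len_eq, PySem.Str.isIn_eq]
          rw [if_neg (by omega), if_pos hm, if_neg hin]
        have hB : length_str_stepB m (ans, true) a = (ans ++ " " ++ a, true) := by
          simp only [length_str_stepB, PySem.Str.len_eq, PySem.Str.isIn_eq]
          rw [if_neg (not_not_intro hm), if_neg (by simp), if_neg hin]
        simp only [List.foldl_cons, hA, hB]
        exact ih _ hle'
    · have hA : length_str_stepA (m, ans) a = (m, ans) := by
        simp only [length_str_stepA, PySem.Str.len_eq]
        rw [if_neg (by omega), if_neg (by omega)]
      have hB : length_str_stepB m (ans, true) a = (ans, true) := by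
        simp only [length_str_stepB, PySem.Str.len_eq]
        rw [if_pos hm]
      simp only [List.foldl_cons, hA, hB]
      exact ih ans hle'

-- main lemma: before the first maximal item, A's running max is below m and B skips everything
theorem fold_main (m : Int) (l : List String) (a0 : Int) (ans0 : String)
    (ha0 : a0 < m)
    (hle : ∀ e ∈ l, PySem.Str.len e ≤ m)
    (hex : ∃ e ∈ l, PySem.Str.len e = m) :
    (l.foldl length_str_stepA (a0, ans0)).2 = (l.foldl (length_str_stepB m) ("", false)).1 := by
  induction l generalizing a0 ans0 with
  | nil => simp at hex
  | cons a t ih =>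
    have hla : ((a.toList.length : Int)) ≤ m := by
      have := hle a (by simp); rwa [PySem.Str.len_eq] at this
    have hle' : ∀ e ∈ t, PySem.Str.len e ≤ m := fun e he => hle e (by simp [he])
    by_cases hm : ((a.toList.length : Int)) = m
    · have hA : length_str_stepA (a0, ans0) a = (m, a) := by
        simp only [length_str_stepA, PySem.Str.len_eq]
        rw [if_pos (by omega)]
        exact Prod.ext hm rfl
      have hB : length_str_stepB m ("", false) a = (a, true) := by
        simp only [length_str_stepB, PySem.Str.len_eq]
        rw [if_neg (not_not_intro hm)]
        simp only [if_pos trivial]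
      simp only [List.foldl_cons, hA, hB]
      exact fold_suffix m t a hle'
    · have hB : length_str_stepB m ("", false) a = ("", false) := by
        simp only [length_str_stepB, PySem.Str.len_eq]
        rw [if_pos hm]
      have hex' : ∃ e ∈ t, PySem.Str.len e = m := by
        rcases hex with ⟨e, he, hem⟩
        rcases List.mem_cons.mp he with rfl | he'
        · rw [PySem.Str.len_eq] at hem; exact (hm hem).elim
        · exact ⟨e, he', hem⟩
      rcases st : length_str_stepA (a0, ans0) a with ⟨a1, ans1⟩
      have ha1 : a1 < m := by
        simp only [length_str_stepA, PySem.Str.len_eq] at st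
        split_ifs at st <;>
          (rw [Prod.mk.injEq] at st; obtain ⟨h1, -⟩ := st; omega)
      simp only [List.foldl_cons, hB, st]
      exact ih a1 ans1 ha1 hle' hex'

-- ===== VERDICT (by name: the statement is the Claim_ definition above) =====
theorem length_str_spec : Claim_equal_length_str := by
  intro lists _
  unfold Spec_length_str length_str length_str_alt
  cases lists with
  | nil => rfl
  | cons h t =>
    have hmax : PySem.List.max? ((h :: t).map PySem.Str.len) (fun y => y)
        = some ((t.map PySem.Str.len).foldl max (PySem.Str.len h)) := by
      rw [List.map_cons]
      exact PySem.List.max?_id_cons (PySem.Str.len h) (t.map PySem.Str.len)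
    generalize hM : (t.map PySem.Str.len).foldl max (PySem.Str.len h) = m at hmax
    rw [if_neg (List.cons_ne_nil h t), hmax]
    show (List.foldl length_str_stepA (0, "") (h :: t)).2
        = (List.foldl (length_str_stepB m) ("", false) (h :: t)).1
    have hle : ∀ e ∈ h :: t, PySem.Str.len e ≤ m := by
      intro e he
      have := PySem.List.max?_isMax hmax (PySem.Str.len e) (List.mem_map_of_mem he)
      simpa using this
    have hmem : m ∈ (h :: t).map PySem.Str.len := PySem.List.max?_mem hmax
    have hex : ∃ e ∈ h :: t, PySem.Str.len e = m := by
      rcases List.mem_map.mp hmem with ⟨e, he, hem⟩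
      exact ⟨e, he, hem⟩
    have hm0 : 0 ≤ m := by
      rcases hex with ⟨e, -, hem⟩
      rw [← hem]; exact len_nonneg e
    rcases hm0.lt_or_eq with hpos | hz
    · exact fold_main m (h :: t) 0 "" hpos hle hex
    · -- m = 0: every item is the empty string
      have hall : ∀ e ∈ h :: t, e = "" := by
        intro e he
        have h1 := hle e he
        have h2 := len_nonneg e
        exact (len_zero_iff e).mp (by omega)
      rw [foldA_all_empty _ hall, ← hz, foldB_all_empty _ false hall]
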